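-- pv_equiv track=rewrite | github.com/cosbidev/Deep-Sick | src/preprocess/chexpert/preprocessReports.py | format_chunks
-- ===== SOURCE A (Python) =====
-- def format_chunks(tokens):
--     # Step 1: Lowercase everything
--     tokens = [t.lower() for t in tokens]
--
--     # Step 2: Capitalize first word and each word after a period
--     result = []
--     capitalize_next = True
--     for token in tokens:
--         if capitalize_next and token.isalpha():
--             result.append(token.capitalize())
--             capitalize_next = False
--         else:
--             result.append(token)
--         if token == '.':
--             capitalize_next = True
--
--     # Step 3: Join into a formatted string
--     text = ' '.join(result)
--
--     # Optional: clean spacing before punctuation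
--     text = text.replace(' .', '.').replace(' ,', ',').replace(' :', ':').replace(' ;', ';')
--
--     return text
-- ===== SOURCE B (Python) =====
-- def _cap_first_alpha(seg):
--     # replace the first alphabetic token of the segment with its capitalized form
--     for k, t in enumerate(seg):
--         if t.isalpha():
--             return seg[:k] + [t.capitalize()] + seg[k + 1:]
--     return seg
--
--
-- def format_chunks(tokens):
--     toks = [t.lower() for t in tokens]
--
--     # split into sentence segments, each '.' ending its segment
--     segs = []
--     cur = []
--     for t in toks:
--         cur.append(t)
--         if t == '.':
--             segs.append(cur)
--             cur = []
--     segs.append(cur)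
--
--     out = []
--     for seg in segs:
--         out.extend(_cap_first_alpha(seg))
--
--     text = ' '.join(out)
--     return text.replace(' .', '.').replace(' ,', ',').replace(' :', ':').replace(' ;', ';')
-- ===== Notes on version B (the rewrite author's own statement) =====
-- stated objective: alternative
-- what changed: Replaces A's single-pass capitalize_next state machine with a segment decomposition: cut the token list after each '.', capitalize the first alphabetic token of each segment, then concatenate, join and clean punctuation.
import Mathlib
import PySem

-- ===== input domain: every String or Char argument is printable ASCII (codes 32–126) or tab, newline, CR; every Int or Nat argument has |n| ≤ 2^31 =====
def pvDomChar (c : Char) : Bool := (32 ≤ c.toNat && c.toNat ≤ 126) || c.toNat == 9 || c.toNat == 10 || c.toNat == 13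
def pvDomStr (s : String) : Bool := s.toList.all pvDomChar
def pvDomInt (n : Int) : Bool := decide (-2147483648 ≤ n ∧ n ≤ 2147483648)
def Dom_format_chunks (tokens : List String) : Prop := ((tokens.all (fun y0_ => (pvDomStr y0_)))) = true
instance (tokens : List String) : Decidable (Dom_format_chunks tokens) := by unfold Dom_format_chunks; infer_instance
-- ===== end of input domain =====

-- B replaces A's capitalize_next state machine by a segment decomposition (cut after each '.',
-- capitalize the first alphabetic token of each segment); alternative decomposition, same cost.

-- Python str.capitalize(): first char uppercased, rest lowercased — exact on the ASCII domain
def pyCapitalize (s : String) : String :=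
  match s.toList with
  | [] => s
  | c :: cs => String.ofList (PySem.Chars.upperChar c :: cs.map PySem.Chars.lowerChar)

-- ===== PORT A =====
-- the for-loop of A: state capitalize_next, tokens emitted in order
def loopA : List String → Bool → List String
  | [], _ => []
  | t :: rest, cap =>
    (if cap && PySem.Str.strIsalpha t then pyCapitalize t else t) ::
      loopA rest (t == "." || (cap && !PySem.Str.strIsalpha t))

def format_chunks (tokens : List String) : String :=
  let toks := tokens.map PySem.Str.lower
  let result := loopA toks true
  let text := PySem.Str.join " " result
  ((((PySem.Str.replace text " ." ".").replace " ," ",").replace " :" ":").replace " ;" ";")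

-- ===== PORT B =====
-- replace the first alphabetic token of a segment with its capitalized form
def capFirstAlpha : List String → List String
  | [] => []
  | t :: rest =>
    if PySem.Str.strIsalpha t then pyCapitalize t :: rest else t :: capFirstAlpha rest

-- cut the token list into segments, each '.' ending its segment (last segment may be empty)
def segments : List String → List (List String)
  | [] => [[]]
  | t :: rest =>
    if t == "." then [t] :: segments rest
    else
      match segments rest with
      | s :: ss => (t :: s) :: ss
      | [] => [[]]

def format_chunks_alt (tokens : List String) : String :=
  let toks := tokens.map PySem.Str.lower
  let result := ((segments toks).map capFirstAlpha).flatten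
  let text := PySem.Str.join " " result
  ((((PySem.Str.replace text " ." ".").replace " ," ",").replace " :" ":").replace " ;" ";")

-- ===== PRECONDITION & SPEC =====
def Spec_format_chunks (tokens : List String) (out : String) : Prop := out = format_chunks_alt tokens
instance (tokens : List String) (out : String) : Decidable (Spec_format_chunks tokens out) := by unfold Spec_format_chunks; infer_instance

-- ===== CLAIM (what is proved, stated in full; the proofs are below) =====
def Claim_equal_format_chunks : Prop := ∀ (tokens : List String), Dom_format_chunks tokens → Spec_format_chunks tokens (format_chunks tokens)

-- ===== LEMMAS AND PROOFS =====

theorem segments_ne_nil (ts : List String) : segments ts ≠ [] := by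
  induction ts with
  | nil => simp [segments]
  | cons t rest ih =>
    simp only [segments]
    split
    · simp
    · cases h : segments rest with
      | nil => simp
      | cons s ss => simp

theorem loopA_eq_segments (ts : List String) :
    loopA ts true = ((segments ts).map capFirstAlpha).flatten ∧
    loopA ts false = (match segments ts with
      | s :: ss => s ++ ((ss.map capFirstAlpha).flatten)
      | [] => []) := by
  induction ts with
  | nil => simp [loopA, segments, capFirstAlpha]
  | cons t rest ih =>
    obtain ⟨ih1, ih2⟩ := ih
    by_cases hdot : t = "."
    · subst hdot
      have halpha : PySem.Chars.strIsalpha ['.'] = false := by decide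
      constructor <;>
        simp [loopA, segments, halpha, capFirstAlpha, ih1]
    · have hne : (t == ".") = false := by simp [hdot]
      cases hseg : segments rest with
      | nil => exact absurd hseg (segments_ne_nil rest)
      | cons s ss =>
        by_cases halpha : PySem.Chars.strIsalpha t.toList = true
        · constructor
          · simp only [loopA, PySem.Str.strIsalpha, halpha, hne, segments]
            simp [hseg, capFirstAlpha, halpha, ih2]
          · simp only [loopA, PySem.Str.strIsalpha, halpha, hne, segments]
            simp [hseg, ih2]
        · have halpha' : PySem.Chars.strIsalpha t.toList = false := by
            simpa using halpha
          constructor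
          · simp only [loopA, PySem.Str.strIsalpha, halpha', hne, segments]
            simp [hseg, capFirstAlpha, halpha', ih1]
          · simp only [loopA, PySem.Str.strIsalpha, halpha', hne, segments]
            simp [hseg, ih2]

-- ===== VERDICT (by name: the statement is the Claim_ definition above) =====
theorem format_chunks_spec : Claim_equal_format_chunks := by
  intro tokens _
  unfold Spec_format_chunks format_chunks format_chunks_alt
  simp [(loopA_eq_segments (tokens.map PySem.Str.lower)).1]
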